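-- pv_equiv track=rewrite | github.com/jeeyoun-kang/codingtest | 1121_3.py | solution
-- ===== SOURCE A (Python) =====
-- def solution(maps):
--     if not maps:
--         return 0
--
--     rows, cols = len(maps), len(maps[0])
--     max_length = 0
--     visited = [[0 for _ in range(cols)] for _ in range(rows)]
--
--     def dfs(row, col):
--         if row < 0 or col < 0 or row >= rows or col >= cols or maps[row][col] != 1 or visited[row][col]:
--             return 0
--
--         visited[row][col] = 1
--
--         length = 4
--         if row > 0 and maps[row - 1][col] == 1:
--             length -= 1
--             length += dfs(row - 1, col)
--         if col > 0 and maps[row][col - 1] == 1: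
--             length -= 1
--             length += dfs(row, col - 1)
--         if row < rows - 1 and maps[row + 1][col] == 1:
--             length -= 1
--             length += dfs(row + 1, col)
--         if col < cols - 1 and maps[row][col + 1] == 1:
--             length -= 1
--             length += dfs(row, col + 1)
--
--         return length
--
--     for i in range(rows):
--         for j in range(cols):
--             if maps[i][j] == 1 and not visited[i][j]:
--                 max_length = max(max_length, dfs(i, j))
--
--     return max_length
-- ===== SOURCE B (Python) =====
-- def solution(maps):
--     if not maps:
--         return 0
--
--     rows, cols = len(maps), len(maps[0])
--
--     def is_land(r, c):
--         return 0 <= r < rows and 0 <= c < cols and maps[r][c] == 1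
--
--     def neighbors(r, c):
--         return [(r - 1, c), (r, c - 1), (r + 1, c), (r, c + 1)]
--
--     # pass 1: label each connected region with an explicit stack (iterative flood fill)
--     visited = set()
--     components = []
--     for i in range(rows):
--         for j in range(cols):
--             if is_land(i, j) and (i, j) not in visited:
--                 cells = []
--                 stack = [(i, j)]
--                 while stack:
--                     cell = stack.pop()
--                     r, c = cell
--                     if not is_land(r, c) or cell in visited:
--                         continue
--                     visited.add(cell)
--                     cells.append(cell)
--                     stack += neighbors(r, c)[::-1]
--                 components.append(cells)
--
--     # pass 2: a region's metric = sum over its cells of (4 - number of land neighbours)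
--     best = 0
--     for cells in components:
--         perim = sum(4 - sum(is_land(nr, nc) for (nr, nc) in neighbors(r, c))
--                     for (r, c) in cells)
--         best = max(best, perim)
--     return best
-- ===== Notes on version B (the rewrite author's own statement) =====
-- stated objective: alternative
-- what changed: A fuses the perimeter arithmetic into a recursive DFS that mutates a visited matrix and accumulates the metric through the recursion; B makes two separate passes: an iterative explicit-stack flood fill over a visited set that only collects each region's cells, then an arithmetic pass computing each region's metric as the sum over its cells of 4 minus its number of land neighbours, maximised over the collected regions. Pre_ excludes ragged grids in which some row is shorter than the first row: there A raises IndexError (B raises too).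
import Mathlib
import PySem

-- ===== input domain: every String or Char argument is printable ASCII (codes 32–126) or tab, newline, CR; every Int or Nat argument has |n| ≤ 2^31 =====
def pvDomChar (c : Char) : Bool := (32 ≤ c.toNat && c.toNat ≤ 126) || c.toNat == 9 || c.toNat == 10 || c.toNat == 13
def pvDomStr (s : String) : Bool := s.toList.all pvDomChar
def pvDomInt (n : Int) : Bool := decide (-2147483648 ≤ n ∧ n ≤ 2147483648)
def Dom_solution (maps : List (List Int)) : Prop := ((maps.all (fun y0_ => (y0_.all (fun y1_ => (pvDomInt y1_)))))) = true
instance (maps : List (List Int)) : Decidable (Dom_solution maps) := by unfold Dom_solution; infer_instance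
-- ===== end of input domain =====

-- B replaces A's fused recursive DFS (metric accumulated inside the recursion over a visited
-- matrix) by two separate passes: an iterative explicit-stack flood fill over a visited set that
-- only collects each region's cells, then an arithmetic pass summing 4 minus the number of land
-- neighbours per cell of each region; same asymptotic cost (objective: alternative).


-- ===== PORT A =====
-- maps[r][c] (indices checked non-negative and in range by A's own guards before use)
def pvMget (maps : List (List Int)) (r c : Int) : Int :=
  PySem.List.pyGetD (PySem.List.pyGetD maps r []) c 0

-- visited[r][c]
def pvVget (vis : List (List Int)) (r c : Int) : Int :=
  PySem.List.pyGetD (PySem.List.pyGetD vis r []) c 0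

-- visited[r][c] = 1
def pvVset (vis : List (List Int)) (r c : Int) : List (List Int) :=
  PySem.List.pySetD vis r (PySem.List.pySetD (PySem.List.pyGetD vis r []) c 1)

-- A's recursive dfs; the Nat fuel only makes the recursion total (Python's recursion has no fuel);
-- the top-level call passes rows*cols+1, proved never to run out (pvFI/pvU bounds below).
def pvDfs (maps : List (List Int)) (rows cols : Int) :
    Nat → Int → Int → List (List Int) → Int × List (List Int)
  | 0, _, _, vis => (0, vis)
  | Nat.succ f, r, c, vis =>
    if r < 0 ∨ c < 0 ∨ rows ≤ r ∨ cols ≤ c ∨ pvMget maps r c ≠ 1 ∨ pvVget vis r c ≠ 0 then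
      (0, vis)
    else
      let vis0 := pvVset vis r c
      let s1 : Int × List (List Int) :=
        if 0 < r ∧ pvMget maps (r - 1) c = 1 then
          let p := pvDfs maps rows cols f (r - 1) c vis0; (4 - 1 + p.1, p.2)
        else (4, vis0)
      let s2 :=
        if 0 < c ∧ pvMget maps r (c - 1) = 1 then
          let p := pvDfs maps rows cols f r (c - 1) s1.2; (s1.1 - 1 + p.1, p.2)
        else s1
      let s3 :=
        if r < rows - 1 ∧ pvMget maps (r + 1) c = 1 then
          let p := pvDfs maps rows cols f (r + 1) c s2.2; (s2.1 - 1 + p.1, p.2)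
        else s2
      let s4 :=
        if c < cols - 1 ∧ pvMget maps r (c + 1) = 1 then
          let p := pvDfs maps rows cols f r (c + 1) s3.2; (s3.1 - 1 + p.1, p.2)
        else s3
      s4

def solution (maps : List (List Int)) : Int :=
  if maps = [] then 0
  else
    let rows : Int := maps.length
    let cols : Int := maps.headI.length
    let fuel : Nat := maps.length * maps.headI.length + 1
    let fin :=
      (PySem.List.pyRange 0 rows 1).foldl (fun st i =>
        (PySem.List.pyRange 0 cols 1).foldl (fun st j =>
          if pvMget maps i j = 1 ∧ pvVget st.2 i j = 0 then
            let p := pvDfs maps rows cols fuel i j st.2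
            (max st.1 p.1, p.2)
          else st) st)
        ((0 : Int), List.replicate maps.length (List.replicate maps.headI.length (0 : Int)))
    fin.1

-- ===== PORT B =====
-- is_land(r, c)
def pvIsLand (maps : List (List Int)) (rows cols : Int) (r c : Int) : Bool :=
  decide (0 ≤ r ∧ r < rows ∧ 0 ≤ c ∧ c < cols ∧ pvMget maps r c = 1)

-- neighbors(r, c)
def pvNbrs (r c : Int) : List (Int × Int) := [(r - 1, c), (r, c - 1), (r + 1, c), (r, c + 1)]

-- all in-range positions (termination measure bookkeeping for the flood-fill loop)
def pvAllPosRC (rows cols : Int) : List (Int × Int) :=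
  (PySem.List.pyRange 0 rows 1).flatMap (fun i =>
    (PySem.List.pyRange 0 cols 1).map (fun j => (i, j)))

-- number of land cells not yet in the visited set (termination measure of pvFlood)
def pvUS (maps : List (List Int)) (rows cols : Int) (vs : PySem.Set (Int × Int)) : Nat :=
  ((pvAllPosRC rows cols).filter
    (fun p => pvIsLand maps rows cols p.1 p.2 && !(PySem.Set.contains vs p))).length

-- generic filter-length lemmas (termination measure of pvFlood)
theorem pvFilt_le {α : Type} (l : List α) (p q : α → Bool)
    (h : ∀ x ∈ l, q x = true → p x = true) : (l.filter q).length ≤ (l.filter p).length := by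
  rw [← List.countP_eq_length_filter, ← List.countP_eq_length_filter]
  exact List.countP_mono_left h
theorem pvFilt_lt {α : Type} (l : List α) (p q : α → Bool) (a : α)
    (ha : a ∈ l) (hpa : p a = true) (hqa : q a = false)
    (h : ∀ x ∈ l, q x = true → p x = true) : (l.filter q).length < (l.filter p).length := by
  induction l with
  | nil => cases ha
  | cons b t ih =>
    have ht : ∀ x ∈ t, q x = true → p x = true := fun x hx => h x (List.mem_cons_of_mem b hx)
    rcases List.mem_cons.mp ha with rfl | hat
    · rw [List.filter_cons_of_neg (by simp [hqa]), List.filter_cons_of_pos hpa]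
      exact Nat.lt_succ_of_le (pvFilt_le t p q ht)
    · by_cases hq : q b = true
      · rw [List.filter_cons_of_pos hq, List.filter_cons_of_pos (h b List.mem_cons_self hq)]
        simpa using ih hat ht
      · rw [List.filter_cons_of_neg (by simpa using hq)]
        by_cases hp : p b = true
        · rw [List.filter_cons_of_pos hp]
          exact Nat.lt_succ_of_lt (ih hat ht)
        · rw [List.filter_cons_of_neg (by simpa using hp)]
          exact ih hat ht
theorem pvMem_allPosRC (rows cols : Int) (p : Int × Int) :
    p ∈ pvAllPosRC rows cols ↔ 0 ≤ p.1 ∧ p.1 < rows ∧ 0 ≤ p.2 ∧ p.2 < cols := by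
  simp only [pvAllPosRC, List.mem_flatMap, List.mem_map, PySem.List.mem_pyRange_one]
  constructor
  · rintro ⟨i, hi, j, hj, hpe⟩
    subst hpe; exact ⟨hi.1, hi.2, hj.1, hj.2⟩
  · rintro ⟨h1, h2, h3, h4⟩
    exact ⟨p.1, ⟨h1, h2⟩, p.2, ⟨h3, h4⟩, rfl⟩

theorem pvUS_lt (maps : List (List Int)) (rows cols : Int) (vs : PySem.Set (Int × Int))
    (q : Int × Int) (hl : pvIsLand maps rows cols q.1 q.2 = true)
    (hnm : PySem.Set.contains vs q = false) :
    pvUS maps rows cols (PySem.Set.add vs q) < pvUS maps rows cols vs := by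
  have hqnm : q ∉ vs := fun hmem => by
    rw [(PySem.Set.contains_iff vs q).mpr hmem] at hnm; cases hnm
  have hmemadd : q ∈ PySem.Set.add vs q := (PySem.Set.mem_add _ _ _).mpr (Or.inr rfl)
  apply pvFilt_lt _ _ _ q
  · rw [pvMem_allPosRC]
    have := of_decide_eq_true hl
    exact ⟨this.1, this.2.1, this.2.2.1, this.2.2.2.1⟩
  · simp [hl, hqnm]
  · simp [hl, hmemadd]
  · intro x hx h'
    simp only [Bool.and_eq_true, Bool.not_eq_true'] at h' ⊢
    refine ⟨h'.1, ?_⟩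
    have hxa : x ∉ PySem.Set.add vs q := fun hm => by
      rw [(PySem.Set.contains_iff _ _).mpr hm] at h'; exact absurd h'.2 (by simp)
    have hxv : x ∉ vs := fun hm => hxa ((PySem.Set.mem_add _ _ _).mpr (Or.inl hm))
    rcases hc : PySem.Set.contains vs x with _ | _
    · rfl
    · exact absurd ((PySem.Set.contains_iff _ _).mp hc) hxv

-- the while-stack flood fill of B; the Lean list head is the Python list's END (the stack top),
-- so Python's `stack += neighbors(r,c)[::-1]` is consing the neighbours in order.
def pvFlood (maps : List (List Int)) (rows cols : Int) :
    List (Int × Int) → PySem.Set (Int × Int) → List (Int × Int) × PySem.Set (Int × Int)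
  | [], vs => ([], vs)
  | q :: rest, vs =>
    if !(pvIsLand maps rows cols q.1 q.2) || PySem.Set.contains vs q then
      pvFlood maps rows cols rest vs
    else
      let vs' := PySem.Set.add vs q
      let res := pvFlood maps rows cols (pvNbrs q.1 q.2 ++ rest) vs'
      (q :: res.1, res.2)
termination_by stack vs => (pvUS maps rows cols vs, stack.length)
decreasing_by
  · apply Prod.Lex.right
    simp [List.length_cons]
  · rename_i hcond
    apply Prod.Lex.left
    simp only [Bool.or_eq_true, Bool.not_eq_true', not_or, Bool.not_eq_false] at hcond
    exact pvUS_lt maps rows cols vs q hcond.1 (by simpa using hcond.2)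

-- perimeter of one collected region: sum over cells of 4 - (number of land neighbours)
def pvPerim (maps : List (List Int)) (rows cols : Int) (cells : List (Int × Int)) : Int :=
  (cells.map (fun q =>
    (4 : Int) - (((pvNbrs q.1 q.2).filter
      (fun n => pvIsLand maps rows cols n.1 n.2)).length : Int))).sum

def solution_alt (maps : List (List Int)) : Int :=
  if maps = [] then 0
  else
    let rows : Int := maps.length
    let cols : Int := maps.headI.length
    let st :=
      (PySem.List.pyRange 0 rows 1).foldl (fun st i =>
        (PySem.List.pyRange 0 cols 1).foldl (fun st j =>
          if pvIsLand maps rows cols i j && !(PySem.Set.contains st.2 (i, j)) then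
            let res := pvFlood maps rows cols [(i, j)] st.2
            (st.1 ++ [res.1], res.2)
          else st) st)
        (([] : List (List (Int × Int))), (PySem.Set.empty : PySem.Set (Int × Int)))
    st.1.foldl (fun best cells => max best (pvPerim maps rows cols cells)) 0

-- ===== PRECONDITION & SPEC =====
-- Pre_ excludes ragged grids where some row is shorter than the first row: there the Python A
-- raises IndexError (it indexes every row up to len(maps[0])-1).
def Pre_solution (maps : List (List Int)) : Prop :=
  ∀ row ∈ maps, maps.headI.length ≤ row.length
instance (maps : List (List Int)) : Decidable (Pre_solution maps) := by
  unfold Pre_solution; infer_instance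
def pvWitness_solution : List (List Int) := [[1, 1], [0, 1]]
def Spec_solution (maps : List (List Int)) (out : Int) : Prop := out = solution_alt maps
instance (maps : List (List Int)) (out : Int) : Decidable (Spec_solution maps out) := by
  unfold Spec_solution; infer_instance

-- ===== CLAIM (what is proved, stated in full; the proofs are below) =====
def Claim_equal_solution : Prop :=
  ∀ (maps : List (List Int)), Dom_solution maps → Pre_solution maps →
    Spec_solution maps (solution maps)

-- ===== LEMMAS AND PROOFS =====

-- the visited matrix keeps A's rows × cols shape
def pvVshape (maps : List (List Int)) (vis : List (List Int)) : Prop :=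
  vis.length = maps.length ∧ ∀ row ∈ vis, row.length = maps.headI.length

-- number of land cells not yet marked in A's visited matrix
def pvU (maps : List (List Int)) (vis : List (List Int)) : Nat :=
  ((pvAllPosRC (maps.length : Int) (maps.headI.length : Int)).filter
    (fun p => pvIsLand maps (maps.length : Int) (maps.headI.length : Int) p.1 p.2
      && (pvVget vis p.1 p.2 == 0))).length

-- correspondence between A's visited matrix and B's visited set (on land cells)
def pvRel (maps : List (List Int)) (vis : List (List Int)) (vs : PySem.Set (Int × Int)) : Prop :=
  ∀ r c, pvIsLand maps (maps.length : Int) (maps.headI.length : Int) r c = true →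
    (pvVget vis r c ≠ 0 ↔ PySem.Set.contains vs (r, c) = true)

-- "vis grows into vis'": shape kept, marks kept, unmarked-land count not increased
def pvGr (maps : List (List Int)) (vis vis' : List (List Int)) : Prop :=
  pvVshape maps vis' ∧
  (∀ r c, pvIsLand maps (maps.length : Int) (maps.headI.length : Int) r c = true →
    pvVget vis r c ≠ 0 → pvVget vis' r c ≠ 0) ∧
  pvU maps vis' ≤ pvU maps vis

theorem pvVget_eq (vis : List (List Int)) (r c : Int) (hr : 0 ≤ r) (hc : 0 ≤ c) :
    pvVget vis r c = ((vis[r.toNat]?).getD [])[c.toNat]?.getD 0 := by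
  unfold pvVget
  rw [PySem.List.pyGetD_of_nonneg vis [] hr, PySem.List.pyGetD_of_nonneg _ _ hc,
      List.getD_eq_getElem?_getD, List.getD_eq_getElem?_getD]

theorem pvVset_eq (vis : List (List Int)) (r c : Int) (hr : 0 ≤ r) (hc : 0 ≤ c) :
    pvVset vis r c = vis.set r.toNat (((vis[r.toNat]?).getD []).set c.toNat 1) := by
  unfold pvVset
  rw [PySem.List.pyGetD_of_nonneg vis [] hr, PySem.List.pySetD_of_nonneg _ _ hc,
      PySem.List.pySetD_of_nonneg _ _ hr, List.getD_eq_getElem?_getD]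

theorem pvVshape_vset (maps : List (List Int)) (vis : List (List Int)) (r c : Int)
    (hr : 0 ≤ r) (hr2 : r < (maps.length : Int)) (hc : 0 ≤ c)
    (hsh : pvVshape maps vis) : pvVshape maps (pvVset vis r c) := by
  obtain ⟨hlen, hrows⟩ := hsh
  have h1 : r.toNat < vis.length := by omega
  rw [pvVset_eq vis r c hr hc]
  refine ⟨by simp [List.length_set, hlen], ?_⟩
  intro row hrow
  rcases List.mem_or_eq_of_mem_set hrow with h | h
  · exact hrows _ h
  · rw [h, List.length_set, List.getElem?_eq_getElem h1]
    simp only [Option.getD_some]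
    exact hrows _ (List.getElem_mem h1)

theorem pvVget_vset (maps : List (List Int)) (vis : List (List Int)) (r c r' c' : Int)
    (hsh : pvVshape maps vis)
    (hr : 0 ≤ r) (hr2 : r < (maps.length : Int)) (hc : 0 ≤ c) (hc2 : c < (maps.headI.length : Int))
    (hr' : 0 ≤ r') (hc' : 0 ≤ c') :
    pvVget (pvVset vis r c) r' c' = if r' = r ∧ c' = c then 1 else pvVget vis r' c' := by
  obtain ⟨hlen, hrows⟩ := hsh
  have h1 : r.toNat < vis.length := by omega
  have hrow : vis[r.toNat]? = some (vis[r.toNat]'h1) := List.getElem?_eq_getElem h1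
  have h2 : c.toNat < (vis[r.toNat]'h1).length := by
    rw [hrows _ (List.getElem_mem h1)]; omega
  rw [pvVset_eq vis r c hr hc, pvVget_eq _ r' c' hr' hc', pvVget_eq vis r' c' hr' hc']
  rw [List.getElem?_set]
  by_cases hre : r.toNat = r'.toNat
  · have hre' : r' = r := by omega
    rw [if_pos hre, if_pos (by omega)]
    simp only [Option.getD_some, hrow, List.getElem?_set]
    by_cases hce : c.toNat = c'.toNat
    · rw [if_pos hce, if_pos h2]
      simp [hre', (by omega : c' = c)]
    · rw [if_neg hce, if_neg (by intro hcc; exact hce (by omega))]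
      simp [hre', hrow]
  · rw [if_neg hre, if_neg (by intro h; exact hre (by omega))]

abbrev pvG (maps : List (List Int)) (rows cols : Int) (vis : List (List Int)) (r c : Int) : Prop :=
  r < 0 ∨ c < 0 ∨ rows ≤ r ∨ cols ≤ c ∨ pvMget maps r c ≠ 1 ∨ pvVget vis r c ≠ 0

-- one sequential neighbour step of A's dfs body
def pvStep (maps : List (List Int)) (rows cols : Int) (f : Nat) (cond : Prop) [Decidable cond]
    (nr nc : Int) (st : Int × List (List Int)) : Int × List (List Int) :=
  if cond then
    let p := pvDfs maps rows cols f nr nc st.2; (st.1 - 1 + p.1, p.2)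
  else st

theorem pvDfs_succ_eq (maps : List (List Int)) (rows cols : Int) (f : Nat) (r c : Int)
    (vis : List (List Int)) :
    pvDfs maps rows cols (f + 1) r c vis =
    if pvG maps rows cols vis r c then (0, vis)
    else pvStep maps rows cols f (c < cols - 1 ∧ pvMget maps r (c + 1) = 1) r (c + 1)
          (pvStep maps rows cols f (r < rows - 1 ∧ pvMget maps (r + 1) c = 1) (r + 1) c
            (pvStep maps rows cols f (0 < c ∧ pvMget maps r (c - 1) = 1) r (c - 1)
              (pvStep maps rows cols f (0 < r ∧ pvMget maps (r - 1) c = 1) (r - 1) c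
                (4, pvVset vis r c)))) := rfl

theorem pvnG_iff (maps : List (List Int)) (vis : List (List Int)) (r c : Int) :
    ¬ pvG maps (maps.length : Int) (maps.headI.length : Int) vis r c ↔
      (pvIsLand maps (maps.length : Int) (maps.headI.length : Int) r c = true ∧ pvVget vis r c = 0) := by
  simp only [pvG, not_or, not_lt, not_le, ne_eq, not_not, pvIsLand, decide_eq_true_eq]
  constructor
  · rintro ⟨h1, h2, h3, h4, h5, h6⟩
    exact ⟨⟨h1, by omega, h2, by omega, h5⟩, h6⟩
  · rintro ⟨⟨h1, h2, h3, h4, h5⟩, h6⟩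
    exact ⟨h1, h3, by omega, by omega, h5, h6⟩

theorem pvG_iff' (maps : List (List Int)) (vis : List (List Int)) (r c : Int) :
    pvG maps (maps.length : Int) (maps.headI.length : Int) vis r c ↔
      (pvIsLand maps (maps.length : Int) (maps.headI.length : Int) r c = false ∨ pvVget vis r c ≠ 0) := by
  by_cases h6 : pvVget vis r c = 0
  · by_cases hl : pvIsLand maps (maps.length : Int) (maps.headI.length : Int) r c = true
    · have hng := (pvnG_iff maps vis r c).mpr ⟨hl, h6⟩
      simp [hng, hl, h6]
    · have hG : pvG maps (maps.length : Int) (maps.headI.length : Int) vis r c := by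
        by_contra hng
        exact hl ((pvnG_iff maps vis r c).mp hng).1
      simp [hG, (by simpa using hl : pvIsLand maps (maps.length : Int) (maps.headI.length : Int) r c = false)]
  · have hG : pvG maps (maps.length : Int) (maps.headI.length : Int) vis r c :=
      Or.inr (Or.inr (Or.inr (Or.inr (Or.inr h6))))
    simp [hG, h6]

theorem pvDfs_stop (maps : List (List Int)) (vis : List (List Int)) (r c : Int)
    (hg : pvG maps (maps.length : Int) (maps.headI.length : Int) vis r c) (f : Nat) :
    pvDfs maps (maps.length : Int) (maps.headI.length : Int) f r c vis = (0, vis) := by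
  cases f with
  | zero => rfl
  | succ f => rw [pvDfs_succ_eq, if_pos hg]

theorem pvDfs_notLand (maps : List (List Int)) (vis : List (List Int)) (r c : Int)
    (h : pvIsLand maps (maps.length : Int) (maps.headI.length : Int) r c = false) (f : Nat) :
    pvDfs maps (maps.length : Int) (maps.headI.length : Int) f r c vis = (0, vis) :=
  pvDfs_stop maps vis r c ((pvG_iff' maps vis r c).mpr (Or.inl h)) f

theorem pvU_vset_lt (maps : List (List Int)) (vis : List (List Int)) (r c : Int)
    (hsh : pvVshape maps vis)
    (hl : pvIsLand maps (maps.length : Int) (maps.headI.length : Int) r c = true)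
    (hv : pvVget vis r c = 0) :
    pvU maps (pvVset vis r c) < pvU maps vis := by
  have hb := of_decide_eq_true hl
  apply pvFilt_lt _ _ _ (r, c)
  · rw [pvMem_allPosRC]; exact ⟨hb.1, hb.2.1, hb.2.2.1, hb.2.2.2.1⟩
  · simp [hl, hv]
  · have h1 := pvVget_vset maps vis r c r c hsh hb.1 hb.2.1 hb.2.2.1 hb.2.2.2.1 hb.1 hb.2.2.1
    rw [if_pos ⟨rfl, rfl⟩] at h1
    simp [h1]
  · intro x hx hq
    simp only [Bool.and_eq_true, beq_iff_eq] at hq ⊢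
    refine ⟨hq.1, ?_⟩
    have hbx := of_decide_eq_true hq.1
    have h1 := pvVget_vset maps vis r c x.1 x.2 hsh hb.1 hb.2.1 hb.2.2.1 hb.2.2.2.1 hbx.1 hbx.2.2.1
    by_cases he : x.1 = r ∧ x.2 = c
    · rw [if_pos he] at h1; rw [h1] at hq; exact absurd hq.2 (by norm_num)
    · rw [if_neg he] at h1; rw [← h1]; exact hq.2

theorem pvGr_refl (maps : List (List Int)) (vis : List (List Int)) (hsh : pvVshape maps vis) :
    pvGr maps vis vis := ⟨hsh, fun _ _ _ h => h, le_refl _⟩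

theorem pvGr_trans (maps : List (List Int)) {a b c : List (List Int)}
    (h1 : pvGr maps a b) (h2 : pvGr maps b c) : pvGr maps a c :=
  ⟨h2.1, fun r c' hl hv => h2.2.1 r c' hl (h1.2.1 r c' hl hv), le_trans h2.2.2 h1.2.2⟩

theorem pvGr_vset (maps : List (List Int)) (vis : List (List Int)) (r c : Int)
    (hsh : pvVshape maps vis)
    (hl : pvIsLand maps (maps.length : Int) (maps.headI.length : Int) r c = true)
    (hv : pvVget vis r c = 0) :
    pvGr maps vis (pvVset vis r c) := by
  have hb := of_decide_eq_true hl
  refine ⟨pvVshape_vset maps vis r c hb.1 hb.2.1 hb.2.2.1 hsh, ?_, le_of_lt (pvU_vset_lt maps vis r c hsh hl hv)⟩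
  intro r' c' hl' hv'
  have hbx := of_decide_eq_true hl'
  have h1 := pvVget_vset maps vis r c r' c' hsh hb.1 hb.2.1 hb.2.2.1 hb.2.2.2.1 hbx.1 hbx.2.2.1
  by_cases he : r' = r ∧ c' = c
  · rw [if_pos he] at h1; rw [h1]; norm_num
  · rw [if_neg he] at h1; rw [h1]; exact hv'

theorem pvM (maps : List (List Int)) :
    ∀ (f : Nat) (r c : Int) (vis : List (List Int)), pvVshape maps vis →
      pvGr maps vis (pvDfs maps (maps.length : Int) (maps.headI.length : Int) f r c vis).2 := by
  intro f
  induction f with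
  | zero => intro r c vis hsh; exact pvGr_refl maps vis hsh
  | succ f ih =>
    intro r c vis hsh
    rw [pvDfs_succ_eq]
    by_cases hg : pvG maps (maps.length : Int) (maps.headI.length : Int) vis r c
    · rw [if_pos hg]; exact pvGr_refl maps vis hsh
    · rw [if_neg hg]
      obtain ⟨hl, hv⟩ := (pvnG_iff maps vis r c).mp hg
      have g0 : pvGr maps vis (pvVset vis r c) := pvGr_vset maps vis r c hsh hl hv
      have step : ∀ (cond : Prop) (inst : Decidable cond) (nr nc : Int)
          (st : Int × List (List Int)), pvVshape maps st.2 →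
          pvGr maps st.2 (@pvStep maps (maps.length : Int) (maps.headI.length : Int) f cond inst nr nc st).2 := by
        intro cond inst nr nc st hs
        unfold pvStep
        split
        · exact ih nr nc st.2 hs
        · exact pvGr_refl maps st.2 hs
      have G1 : pvGr maps vis (pvStep maps (maps.length : Int) (maps.headI.length : Int) f (0 < r ∧ pvMget maps (r - 1) c = 1) (r - 1) c ((4 : Int), pvVset vis r c)).2 := pvGr_trans maps g0 (step (0 < r ∧ pvMget maps (r - 1) c = 1) inferInstance (r - 1) c ((4 : Int), pvVset vis r c) g0.1)
      have G2 : pvGr maps vis (pvStep maps (maps.length : Int) (maps.headI.length : Int) f (0 < c ∧ pvMget maps r (c - 1) = 1) r (c - 1) (pvStep maps (maps.length : Int) (maps.headI.length : Int) f (0 < r ∧ pvMget maps (r - 1) c = 1) (r - 1) c ((4 : Int), pvVset vis r c))).2 := pvGr_trans maps G1 (step (0 < c ∧ pvMget maps r (c - 1) = 1) inferInstance r (c - 1) (pvStep maps (maps.length : Int) (maps.headI.length : Int) f (0 < r ∧ pvMget maps (r - 1) c = 1) (r - 1) c ((4 : Int), pvVset vis r c)) G1.1)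
      have G3 : pvGr maps vis (pvStep maps (maps.length : Int) (maps.headI.length : Int) f (r < (maps.length : Int) - 1 ∧ pvMget maps (r + 1) c = 1) (r + 1) c (pvStep maps (maps.length : Int) (maps.headI.length : Int) f (0 < c ∧ pvMget maps r (c - 1) = 1) r (c - 1) (pvStep maps (maps.length : Int) (maps.headI.length : Int) f (0 < r ∧ pvMget maps (r - 1) c = 1) (r - 1) c ((4 : Int), pvVset vis r c)))).2 := pvGr_trans maps G2 (step (r < (maps.length : Int) - 1 ∧ pvMget maps (r + 1) c = 1) inferInstance (r + 1) c (pvStep maps (maps.length : Int) (maps.headI.length : Int) f (0 < c ∧ pvMget maps r (c - 1) = 1) r (c - 1) (pvStep maps (maps.length : Int) (maps.headI.length : Int) f (0 < r ∧ pvMget maps (r - 1) c = 1) (r - 1) c ((4 : Int), pvVset vis r c))) G2.1)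
      have G4 : pvGr maps vis (pvStep maps (maps.length : Int) (maps.headI.length : Int) f (c < (maps.headI.length : Int) - 1 ∧ pvMget maps r (c + 1) = 1) r (c + 1) (pvStep maps (maps.length : Int) (maps.headI.length : Int) f (r < (maps.length : Int) - 1 ∧ pvMget maps (r + 1) c = 1) (r + 1) c (pvStep maps (maps.length : Int) (maps.headI.length : Int) f (0 < c ∧ pvMget maps r (c - 1) = 1) r (c - 1) (pvStep maps (maps.length : Int) (maps.headI.length : Int) f (0 < r ∧ pvMget maps (r - 1) c = 1) (r - 1) c ((4 : Int), pvVset vis r c))))).2 := pvGr_trans maps G3 (step (c < (maps.headI.length : Int) - 1 ∧ pvMget maps r (c + 1) = 1) inferInstance r (c + 1) (pvStep maps (maps.length : Int) (maps.headI.length : Int) f (r < (maps.length : Int) - 1 ∧ pvMget maps (r + 1) c = 1) (r + 1) c (pvStep maps (maps.length : Int) (maps.headI.length : Int) f (0 < c ∧ pvMget maps r (c - 1) = 1) r (c - 1) (pvStep maps (maps.length : Int) (maps.headI.length : Int) f (0 < r ∧ pvMget maps (r - 1) c = 1) (r - 1) c ((4 : Int), pvVset vis r c)))) G3.1)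
      exact G4

theorem pvStep_Gr (maps : List (List Int)) (f : Nat) (cond : Prop) (inst : Decidable cond)
    (nr nc : Int) (st : Int × List (List Int)) (hs : pvVshape maps st.2) :
    pvGr maps st.2 (@pvStep maps (maps.length : Int) (maps.headI.length : Int) f cond inst nr nc st).2 := by
  unfold pvStep
  split
  · exact pvM maps f nr nc st.2 hs
  · exact pvGr_refl maps st.2 hs

theorem pvFI (maps : List (List Int)) :
    ∀ (f f' : Nat) (r c : Int) (vis : List (List Int)), pvVshape maps vis →
      pvU maps vis < f → pvU maps vis < f' →
      pvDfs maps (maps.length : Int) (maps.headI.length : Int) f r c vis =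
      pvDfs maps (maps.length : Int) (maps.headI.length : Int) f' r c vis := by
  intro f
  induction f using Nat.strong_induction_on with
  | _ f ih =>
    intro f' r c vis hsh hUf hUf'
    obtain ⟨g, rfl⟩ : ∃ g, f = g + 1 := ⟨f - 1, by omega⟩
    obtain ⟨g', rfl⟩ : ∃ g', f' = g' + 1 := ⟨f' - 1, by omega⟩
    rw [pvDfs_succ_eq, pvDfs_succ_eq]
    by_cases hg : pvG maps (maps.length : Int) (maps.headI.length : Int) vis r c
    · rw [if_pos hg, if_pos hg]
    · rw [if_neg hg, if_neg hg]
      obtain ⟨hl, hv⟩ := (pvnG_iff maps vis r c).mp hg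
      have hb := of_decide_eq_true hl
      have hU0 : pvU maps (pvVset vis r c) < pvU maps vis :=
        pvU_vset_lt maps vis r c hsh hl hv
      have hsh0 : pvVshape maps (pvVset vis r c) :=
        pvVshape_vset maps vis r c hb.1 hb.2.1 hb.2.2.1 hsh
      have step : ∀ (cond : Prop) (inst : Decidable cond) (nr nc : Int)
          (st : Int × List (List Int)), pvVshape maps st.2 →
          pvU maps st.2 < g → pvU maps st.2 < g' →
          @pvStep maps (maps.length : Int) (maps.headI.length : Int) g cond inst nr nc st =
          @pvStep maps (maps.length : Int) (maps.headI.length : Int) g' cond inst nr nc st := by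
        intro cond inst nr nc st hs h1 h2
        unfold pvStep
        split
        · rw [ih g (by omega) g' nr nc st.2 hs h1 h2]
        · rfl
      have hU00 : pvU maps (pvVset vis r c) < pvU maps vis := hU0
      have e1 := step (0 < r ∧ pvMget maps (r - 1) c = 1) inferInstance (r - 1) c ((4 : Int), pvVset vis r c) hsh0 (by show pvU maps (pvVset vis r c) < g; omega) (by show pvU maps (pvVset vis r c) < g'; omega)
      rw [← e1]
      have Gs1 : pvGr maps ((4 : Int), pvVset vis r c).2 (pvStep maps (maps.length : Int) (maps.headI.length : Int) g (0 < r ∧ pvMget maps (r - 1) c = 1) (r - 1) c ((4 : Int), pvVset vis r c)).2 := pvStep_Gr maps g (0 < r ∧ pvMget maps (r - 1) c = 1) inferInstance (r - 1) c ((4 : Int), pvVset vis r c) hsh0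
      have hle1 : pvU maps (pvStep maps (maps.length : Int) (maps.headI.length : Int) g (0 < r ∧ pvMget maps (r - 1) c = 1) (r - 1) c ((4 : Int), pvVset vis r c)).2 ≤ pvU maps (pvVset vis r c) := Gs1.2.2
      have e2 := step (0 < c ∧ pvMget maps r (c - 1) = 1) inferInstance r (c - 1) (pvStep maps (maps.length : Int) (maps.headI.length : Int) g (0 < r ∧ pvMget maps (r - 1) c = 1) (r - 1) c ((4 : Int), pvVset vis r c)) Gs1.1 (by omega) (by omega)
      rw [← e2]
      have Gs2 : pvGr maps ((4 : Int), pvVset vis r c).2 (pvStep maps (maps.length : Int) (maps.headI.length : Int) g (0 < c ∧ pvMget maps r (c - 1) = 1) r (c - 1) (pvStep maps (maps.length : Int) (maps.headI.length : Int) g (0 < r ∧ pvMget maps (r - 1) c = 1) (r - 1) c ((4 : Int), pvVset vis r c))).2 := pvGr_trans maps Gs1 (pvStep_Gr maps g (0 < c ∧ pvMget maps r (c - 1) = 1) inferInstance r (c - 1) (pvStep maps (maps.length : Int) (maps.headI.length : Int) g (0 < r ∧ pvMget maps (r - 1) c = 1) (r - 1) c ((4 : Int), pvVset vis r c)) Gs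1.1)
      have hle2 : pvU maps (pvStep maps (maps.length : Int) (maps.headI.length : Int) g (0 < c ∧ pvMget maps r (c - 1) = 1) r (c - 1) (pvStep maps (maps.length : Int) (maps.headI.length : Int) g (0 < r ∧ pvMget maps (r - 1) c = 1) (r - 1) c ((4 : Int), pvVset vis r c))).2 ≤ pvU maps (pvVset vis r c) := Gs2.2.2
      have e3 := step (r < (maps.length : Int) - 1 ∧ pvMget maps (r + 1) c = 1) inferInstance (r + 1) c (pvStep maps (maps.length : Int) (maps.headI.length : Int) g (0 < c ∧ pvMget maps r (c - 1) = 1) r (c - 1) (pvStep maps (maps.length : Int) (maps.headI.length : Int) g (0 < r ∧ pvMget maps (r - 1) c = 1) (r - 1) c ((4 : Int), pvVset vis r c))) Gs2.1 (by omega) (by omega)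
      rw [← e3]
      have Gs3 : pvGr maps ((4 : Int), pvVset vis r c).2 (pvStep maps (maps.length : Int) (maps.headI.length : Int) g (r < (maps.length : Int) - 1 ∧ pvMget maps (r + 1) c = 1) (r + 1) c (pvStep maps (maps.length : Int) (maps.headI.length : Int) g (0 < c ∧ pvMget maps r (c - 1) = 1) r (c - 1) (pvStep maps (maps.length : Int) (maps.headI.length : Int) g (0 < r ∧ pvMget maps (r - 1) c = 1) (r - 1) c ((4 : Int), pvVset vis r c)))).2 := pvGr_trans maps Gs2 (pvStep_Gr maps g (r < (maps.length : Int) - 1 ∧ pvMget maps (r + 1) c = 1) inferInstance (r + 1) c (pvStep maps (maps.length : Int) (maps.headI.length : Int) g (0 < c ∧ pvMget maps r (c - 1) = 1) r (c - 1) (pvStep maps (maps.length : Int) (maps.headI.length : Int) g (0 < r ∧ pvMget maps (r - 1) c = 1) (r - 1) c ((4 : Int), pvVset vis r c))) Gs2.1)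
      have hle3 : pvU maps (pvStep maps (maps.length : Int) (maps.headI.length : Int) g (r < (maps.length : Int) - 1 ∧ pvMget maps (r + 1) c = 1) (r + 1) c (pvStep maps (maps.length : Int) (maps.headI.length : Int) g (0 < c ∧ pvMget maps r (c - 1) = 1) r (c - 1) (pvStep maps (maps.length : Int) (maps.headI.length : Int) g (0 < r ∧ pvMget maps (r - 1) c = 1) (r - 1) c ((4 : Int), pvVset vis r c)))).2 ≤ pvU maps (pvVset vis r c) := Gs3.2.2
      have e4 := step (c < (maps.headI.length : Int) - 1 ∧ pvMget maps r (c + 1) = 1) inferInstance r (c + 1) (pvStep maps (maps.length : Int) (maps.headI.length : Int) g (r < (maps.length : Int) - 1 ∧ pvMget maps (r + 1) c = 1) (r + 1) c (pvStep maps (maps.length : Int) (maps.headI.length : Int) g (0 < c ∧ pvMget maps r (c - 1) = 1) r (c - 1) (pvStep maps (maps.length : Int) (maps.headI.length : Int) g (0 < r ∧ pvMget maps (r - 1) c = 1) (r - 1) c ((4 : Int), pvVset vis r c)))) Gs3.1 (by omega) (by omega)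
      rw [← e4]

def pvDfsL (maps : List (List Int)) (f : Nat) :
    List (Int × Int) → List (List Int) → Int × List (List Int)
  | [], vis => (0, vis)
  | q :: qs, vis =>
    let p := pvDfs maps (maps.length : Int) (maps.headI.length : Int) f q.1 q.2 vis
    let t := pvDfsL maps f qs p.2
    (p.1 + t.1, t.2)

theorem pvDfsL_append (maps : List (List Int)) (f : Nat) (as bs : List (Int × Int))
    (vis : List (List Int)) :
    pvDfsL maps f (as ++ bs) vis =
      ((pvDfsL maps f as vis).1 + (pvDfsL maps f bs (pvDfsL maps f as vis).2).1,
       (pvDfsL maps f bs (pvDfsL maps f as vis).2).2) := by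
  induction as generalizing vis with
  | nil => simp [pvDfsL]
  | cons q qs ih =>
    simp only [List.cons_append, pvDfsL, ih]
    refine Prod.ext ?_ rfl
    dsimp only
    ring

theorem pvCnt_eq (maps : List (List Int)) (r c : Int) :
    ((((pvNbrs r c).filter (fun n => pvIsLand maps (maps.length : Int) (maps.headI.length : Int) n.1 n.2)).length : Int)) =
      (if pvIsLand maps (maps.length : Int) (maps.headI.length : Int) (r - 1) c = true then 1 else 0) +
      (if pvIsLand maps (maps.length : Int) (maps.headI.length : Int) r (c - 1) = true then 1 else 0) +
      (if pvIsLand maps (maps.length : Int) (maps.headI.length : Int) (r + 1) c = true then 1 else 0) +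
      (if pvIsLand maps (maps.length : Int) (maps.headI.length : Int) r (c + 1) = true then 1 else 0) := by
  rcases h1 : pvIsLand maps (maps.length : Int) (maps.headI.length : Int) (r - 1) c with _ | _ <;>
    rcases h2 : pvIsLand maps (maps.length : Int) (maps.headI.length : Int) r (c - 1) with _ | _ <;>
    rcases h3 : pvIsLand maps (maps.length : Int) (maps.headI.length : Int) (r + 1) c with _ | _ <;>
    rcases h4 : pvIsLand maps (maps.length : Int) (maps.headI.length : Int) r (c + 1) with _ | _ <;>
    simp [pvNbrs, h1, h2, h3, h4]

theorem pvDfs_expand (maps : List (List Int)) (f : Nat) (r c : Int) (vis : List (List Int))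
    (hsh : pvVshape maps vis) (hU : pvU maps vis < f)
    (hg : ¬ pvG maps (maps.length : Int) (maps.headI.length : Int) vis r c) :
    pvDfs maps (maps.length : Int) (maps.headI.length : Int) f r c vis =
      ((4 : Int) - (((pvNbrs r c).filter (fun n => pvIsLand maps (maps.length : Int) (maps.headI.length : Int) n.1 n.2)).length : Int)
        + (pvDfsL maps f (pvNbrs r c) (pvVset vis r c)).1,
       (pvDfsL maps f (pvNbrs r c) (pvVset vis r c)).2) := by
  obtain ⟨hl, hv⟩ := (pvnG_iff maps vis r c).mp hg
  have hb := of_decide_eq_true hl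
  obtain ⟨g, rfl⟩ : ∃ g, f = g + 1 := ⟨f - 1, by omega⟩
  have hU0 : pvU maps (pvVset vis r c) < pvU maps vis := pvU_vset_lt maps vis r c hsh hl hv
  have hsh0 : pvVshape maps (pvVset vis r c) := pvVshape_vset maps vis r c hb.1 hb.2.1 hb.2.2.1 hsh
  have stepEq : ∀ (cond : Prop) (inst : Decidable cond) (nr nc : Int) (acc : Int)
      (v : List (List Int)),
      (cond ↔ pvIsLand maps (maps.length : Int) (maps.headI.length : Int) nr nc = true) →
      pvVshape maps v → pvU maps v < g →
      @pvStep maps (maps.length : Int) (maps.headI.length : Int) g cond inst nr nc (acc, v) =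
        (acc + (pvDfs maps (maps.length : Int) (maps.headI.length : Int) (g + 1) nr nc v).1
          - (if pvIsLand maps (maps.length : Int) (maps.headI.length : Int) nr nc = true then 1 else 0),
         (pvDfs maps (maps.length : Int) (maps.headI.length : Int) (g + 1) nr nc v).2) := by
    intro cond inst nr nc acc v hiff hs hu
    unfold pvStep
    split
    · rename_i hcond
      have hland := hiff.mp hcond
      dsimp only
      rw [pvFI maps g (g + 1) nr nc v hs hu (by omega), if_pos hland]
      refine Prod.ext ?_ rfl
      dsimp only
      ring
    · rename_i hcond
      have hland : pvIsLand maps (maps.length : Int) (maps.headI.length : Int) nr nc = false := by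
        rcases hx : pvIsLand maps (maps.length : Int) (maps.headI.length : Int) nr nc with _ | _
        · rfl
        · exact absurd (hiff.mpr hx) hcond
      rw [pvDfs_notLand maps v nr nc hland (g + 1), if_neg (by simp [hland])]
      simp
  have hiff1 : (0 < r ∧ pvMget maps (r - 1) c = 1) ↔ pvIsLand maps (maps.length : Int) (maps.headI.length : Int) (r - 1) c = true := by
    simp only [pvIsLand, decide_eq_true_eq]
    constructor
    · rintro ⟨h1, h2⟩; exact ⟨by omega, by omega, by omega, by omega, h2⟩
    · rintro ⟨_, _, _, _, h5⟩; refine ⟨by omega, h5⟩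
  have hiff2 : (0 < c ∧ pvMget maps r (c - 1) = 1) ↔ pvIsLand maps (maps.length : Int) (maps.headI.length : Int) r (c - 1) = true := by
    simp only [pvIsLand, decide_eq_true_eq]
    constructor
    · rintro ⟨h1, h2⟩; exact ⟨by omega, by omega, by omega, by omega, h2⟩
    · rintro ⟨_, _, _, _, h5⟩; refine ⟨by omega, h5⟩
  have hiff3 : (r < (maps.length : Int) - 1 ∧ pvMget maps (r + 1) c = 1) ↔ pvIsLand maps (maps.length : Int) (maps.headI.length : Int) (r + 1) c = true := by
    simp only [pvIsLand, decide_eq_true_eq]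
    constructor
    · rintro ⟨h1, h2⟩; exact ⟨by omega, by omega, by omega, by omega, h2⟩
    · rintro ⟨_, _, _, _, h5⟩; refine ⟨by omega, h5⟩
  have hiff4 : (c < (maps.headI.length : Int) - 1 ∧ pvMget maps r (c + 1) = 1) ↔ pvIsLand maps (maps.length : Int) (maps.headI.length : Int) r (c + 1) = true := by
    simp only [pvIsLand, decide_eq_true_eq]
    constructor
    · rintro ⟨h1, h2⟩; exact ⟨by omega, by omega, by omega, by omega, h2⟩
    · rintro ⟨_, _, _, _, h5⟩; refine ⟨by omega, h5⟩
  rw [pvDfs_succ_eq, if_neg hg]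
  rw [pvCnt_eq maps r c]
  rw [stepEq _ _ (r - 1) c 4 (pvVset vis r c) hiff1 hsh0
        (by show pvU maps (pvVset vis r c) < g; omega)]
  have hd1 := pvM maps (g + 1) (r - 1) c (pvVset vis r c) hsh0
  have hu1 : pvU maps (pvDfs maps (maps.length : Int) (maps.headI.length : Int) (g + 1) (r - 1) c (pvVset vis r c)).2 < g := by
    have := hd1.2.2; omega
  rw [stepEq _ _ r (c - 1) _ _ hiff2 hd1.1 hu1]
  have hd2 := pvGr_trans maps hd1 (pvM maps (g + 1) r (c - 1) _ hd1.1)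
  have hu2 : pvU maps (pvDfs maps (maps.length : Int) (maps.headI.length : Int) (g + 1) r (c - 1) (pvDfs maps (maps.length : Int) (maps.headI.length : Int) (g + 1) (r - 1) c (pvVset vis r c)).2).2 < g := by
    have := hd2.2.2; omega
  rw [stepEq _ _ (r + 1) c _ _ hiff3 hd2.1 hu2]
  have hd3 := pvGr_trans maps hd2 (pvM maps (g + 1) (r + 1) c _ hd2.1)
  have hu3 : pvU maps (pvDfs maps (maps.length : Int) (maps.headI.length : Int) (g + 1) (r + 1) c (pvDfs maps (maps.length : Int) (maps.headI.length : Int) (g + 1) r (c - 1) (pvDfs maps (maps.length : Int) (maps.headI.length : Int) (g + 1) (r - 1) c (pvVset vis r c)).2).2).2 < g := by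
    have := hd3.2.2; omega
  rw [stepEq _ _ r (c + 1) _ _ hiff4 hd3.1 hu3]
  simp only [pvDfsL, pvNbrs]
  refine Prod.ext ?_ rfl
  dsimp only
  ring

theorem pvRel_vset (maps : List (List Int)) (vis : List (List Int))
    (vs : PySem.Set (Int × Int)) (q : Int × Int) (hsh : pvVshape maps vis)
    (hrel : pvRel maps vis vs)
    (hl : pvIsLand maps (maps.length : Int) (maps.headI.length : Int) q.1 q.2 = true) :
    pvRel maps (pvVset vis q.1 q.2) (PySem.Set.add vs q) := by
  intro r' c' hl'
  have hb := of_decide_eq_true hl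
  have hb' := of_decide_eq_true hl'
  have h1 := pvVget_vset maps vis q.1 q.2 r' c' hsh hb.1 hb.2.1 hb.2.2.1 hb.2.2.2.1 hb'.1 hb'.2.2.1
  by_cases he : r' = q.1 ∧ c' = q.2
  · rw [if_pos he] at h1
    rw [h1]
    constructor
    · intro _
      exact (PySem.Set.contains_iff _ _).mpr
        ((PySem.Set.mem_add _ _ _).mpr (Or.inr (by rw [he.1, he.2])))
    · intro _; norm_num
  · rw [if_neg he] at h1
    rw [h1, hrel r' c' hl']
    constructor
    · intro h
      exact (PySem.Set.contains_iff _ _).mpr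
        ((PySem.Set.mem_add _ _ _).mpr (Or.inl ((PySem.Set.contains_iff _ _).mp h)))
    · intro h
      rcases (PySem.Set.mem_add _ _ _).mp ((PySem.Set.contains_iff _ _).mp h) with hm | heq
      · exact (PySem.Set.contains_iff _ _).mpr hm
      · exact absurd ⟨congrArg Prod.fst heq, congrArg Prod.snd heq⟩ he

theorem pvSim (maps : List (List Int)) :
    ∀ (stack : List (Int × Int)) (vs : PySem.Set (Int × Int)),
      ∀ (f : Nat) (vis : List (List Int)),
      pvVshape maps vis → pvRel maps vis vs → pvU maps vis < f →
      (pvDfsL maps f stack vis).1 =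
          pvPerim maps (maps.length : Int) (maps.headI.length : Int) (pvFlood maps (maps.length : Int) (maps.headI.length : Int) stack vs).1
        ∧ pvRel maps (pvDfsL maps f stack vis).2 (pvFlood maps (maps.length : Int) (maps.headI.length : Int) stack vs).2
        ∧ pvGr maps vis (pvDfsL maps f stack vis).2 := by
  intro stack vs
  induction stack, vs using pvFlood.induct maps (maps.length : Int) (maps.headI.length : Int) with
  | case1 vs =>
    intro f vis hsh hrel hU
    refine ⟨?_, ?_, ?_⟩
    · simp [pvDfsL, pvFlood, pvPerim]
    · simpa [pvDfsL, pvFlood] using hrel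
    · simpa [pvDfsL] using pvGr_refl maps vis hsh
  | case2 q rest vs hcond ih =>
    intro f vis hsh hrel hU
    have hG : pvG maps (maps.length : Int) (maps.headI.length : Int) vis q.1 q.2 := by
      rcases hland : pvIsLand maps (maps.length : Int) (maps.headI.length : Int) q.1 q.2 with _ | _
      · exact (pvG_iff' maps vis q.1 q.2).mpr (Or.inl hland)
      · have hcont : PySem.Set.contains vs q = true := by
          rcases hx : PySem.Set.contains vs q with _ | _
          · rw [hland, hx] at hcond; simp at hcond
          · rfl
        exact (pvG_iff' maps vis q.1 q.2).mpr (Or.inr ((hrel q.1 q.2 hland).mpr (by rw [← hcont]) ))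
    have hstop := pvDfs_stop maps vis q.1 q.2 hG f
    rw [pvFlood]
    rw [if_pos hcond]
    simp only [pvDfsL, hstop]
    have := ih f vis hsh hrel hU
    simpa using this
  | case3 q rest vs hcond vsadd ih =>
    intro f vis hsh hrel hU
    rw [show vsadd = vs.add q from rfl] at ih
    have hnc : ¬(!(pvIsLand maps (maps.length : Int) (maps.headI.length : Int) q.1 q.2) || PySem.Set.contains vs q) = true := hcond
    simp only [Bool.or_eq_true, Bool.not_eq_true', not_or, Bool.not_eq_false, Bool.not_eq_true] at hnc
    have hland := hnc.1
    have hcont := hnc.2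
    have hv : pvVget vis q.1 q.2 = 0 := by
      by_contra hne
      rw [(hrel q.1 q.2 hland).mp hne] at hcont
      cases hcont
    have hg : ¬ pvG maps (maps.length : Int) (maps.headI.length : Int) vis q.1 q.2 := (pvnG_iff maps vis q.1 q.2).mpr ⟨hland, hv⟩
    have hb := of_decide_eq_true hland
    have hexp := pvDfs_expand maps f q.1 q.2 vis hsh hU hg
    have hsh0 : pvVshape maps (pvVset vis q.1 q.2) :=
      pvVshape_vset maps vis q.1 q.2 hb.1 hb.2.1 hb.2.2.1 hsh
    have hrel0 : pvRel maps (pvVset vis q.1 q.2) (PySem.Set.add vs q) :=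
      pvRel_vset maps vis vs q hsh hrel hland
    have hU0 : pvU maps (pvVset vis q.1 q.2) < f :=
      lt_of_lt_of_le (pvU_vset_lt maps vis q.1 q.2 hsh hland hv) (le_of_lt hU)
    have hih := ih f (pvVset vis q.1 q.2) hsh0 hrel0 hU0
    rw [pvFlood]
    rw [if_neg hcond]
    simp only [pvDfsL, hexp]
    rw [pvDfsL_append maps f (pvNbrs q.1 q.2) rest (pvVset vis q.1 q.2)] at hih
    dsimp only at hih
    constructor
    · simp only [pvPerim, List.map_cons, List.sum_cons]
      have h1 := hih.1
      simp only [pvPerim] at h1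
      omega
    constructor
    · exact hih.2.1
    · exact pvGr_trans maps (pvGr_vset maps vis q.1 q.2 hsh hland hv) hih.2.2


theorem pvPyGetD_mem_or {α : Type} (xs : List α) (i : Int) (d : α) :
    PySem.List.pyGetD xs i d = d ∨ PySem.List.pyGetD xs i d ∈ xs := by
  rcases h : PySem.List.pyGet? xs i with _ | x
  · left; simp [PySem.List.pyGetD, h]
  · right
    have hx := PySem.List.mem_of_pyGet?_eq_some xs h
    have : PySem.List.pyGetD xs i d = x := by simp [PySem.List.pyGetD, h]
    rw [this]; exact hx

theorem pvVget_replicate (n m : Nat) (r c : Int) :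
    pvVget (List.replicate n (List.replicate m (0 : Int))) r c = 0 := by
  unfold pvVget
  rcases pvPyGetD_mem_or (List.replicate n (List.replicate m (0 : Int))) r [] with h | h
  · rw [h]
    rcases pvPyGetD_mem_or ([] : List Int) c 0 with h2 | h2
    · exact h2
    · cases h2
  · rw [List.eq_of_mem_replicate h]
    rcases pvPyGetD_mem_or (List.replicate m (0 : Int)) c 0 with h2 | h2
    · exact h2
    · exact List.eq_of_mem_replicate h2

theorem pvAllPos_length (maps : List (List Int)) :
    (pvAllPosRC (maps.length : Int) (maps.headI.length : Int)).length
      = maps.length * maps.headI.length := by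
  unfold pvAllPosRC
  rw [List.length_flatMap]
  have hone : ∀ i : Int, ((PySem.List.pyRange 0 (maps.headI.length : Int) 1).map
      (fun j => (i, j))).length = maps.headI.length := by
    intro i
    rw [List.length_map, PySem.List.length_pyRange_one]
    omega
  have key : ∀ is : List Int,
      (is.map (fun a => ((PySem.List.pyRange 0 (maps.headI.length : Int) 1).map
        (fun j => (a, j))).length)).sum = is.length * maps.headI.length := by
    intro is
    induction is with
    | nil => simp
    | cons x xs ih2 =>
      rw [List.map_cons, List.sum_cons, hone x, ih2, List.length_cons, Nat.succ_mul]
      omega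
  rw [key, PySem.List.length_pyRange_one]
  have h3 : ((maps.length : Int) - 0).toNat = maps.length := by omega
  rw [h3]

theorem pvU_le_len (maps : List (List Int)) (vis : List (List Int)) :
    pvU maps vis ≤ maps.length * maps.headI.length := by
  rw [← pvAllPos_length maps]
  exact List.length_filter_le _ _

theorem pvInner (maps : List (List Int)) (i : Int) (hi0 : 0 ≤ i) (hi1 : i < (maps.length : Int)) :
    ∀ (js : List Int) (stA : Int × List (List Int))
      (stB : List (List (Int × Int)) × PySem.Set (Int × Int)),
    (∀ j ∈ js, 0 ≤ j ∧ j < (maps.headI.length : Int)) →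
    pvVshape maps stA.2 → pvRel maps stA.2 stB.2 →
    pvU maps stA.2 < (maps.length * maps.headI.length + 1) →
    stA.1 = stB.1.foldl (fun best cells => max best (pvPerim maps (maps.length : Int) (maps.headI.length : Int) cells)) 0 →
    (js.foldl (fun st j =>
        if pvMget maps i j = 1 ∧ pvVget st.2 i j = 0 then
          let p := pvDfs maps (maps.length : Int) (maps.headI.length : Int) (maps.length * maps.headI.length + 1) i j st.2
          (max st.1 p.1, p.2)
        else st) stA).1 =
        ((js.foldl (fun st j =>
        if pvIsLand maps (maps.length : Int) (maps.headI.length : Int) i j && !(PySem.Set.contains st.2 (i, j)) then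
          let res := pvFlood maps (maps.length : Int) (maps.headI.length : Int) [(i, j)] st.2
          (st.1 ++ [res.1], res.2)
        else st) stB).1.foldl (fun best cells => max best (pvPerim maps (maps.length : Int) (maps.headI.length : Int) cells)) 0)
      ∧ pvVshape maps (js.foldl (fun st j =>
        if pvMget maps i j = 1 ∧ pvVget st.2 i j = 0 then
          let p := pvDfs maps (maps.length : Int) (maps.headI.length : Int) (maps.length * maps.headI.length + 1) i j st.2
          (max st.1 p.1, p.2)
        else st) stA).2
      ∧ pvRel maps (js.foldl (fun st j =>
        if pvMget maps i j = 1 ∧ pvVget st.2 i j = 0 then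
          let p := pvDfs maps (maps.length : Int) (maps.headI.length : Int) (maps.length * maps.headI.length + 1) i j st.2
          (max st.1 p.1, p.2)
        else st) stA).2 (js.foldl (fun st j =>
        if pvIsLand maps (maps.length : Int) (maps.headI.length : Int) i j && !(PySem.Set.contains st.2 (i, j)) then
          let res := pvFlood maps (maps.length : Int) (maps.headI.length : Int) [(i, j)] st.2
          (st.1 ++ [res.1], res.2)
        else st) stB).2
      ∧ pvU maps (js.foldl (fun st j =>
        if pvMget maps i j = 1 ∧ pvVget st.2 i j = 0 then
          let p := pvDfs maps (maps.length : Int) (maps.headI.length : Int) (maps.length * maps.headI.length + 1) i j st.2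
          (max st.1 p.1, p.2)
        else st) stA).2 < (maps.length * maps.headI.length + 1) := by
  intro js
  induction js with
  | nil =>
    intro stA stB hjs hsh hrel hU hmax
    exact ⟨hmax, hsh, hrel, hU⟩
  | cons j js ih =>
    intro stA stB hjs hsh hrel hU hmax
    obtain ⟨hj0, hj1⟩ := hjs j (List.mem_cons_self)
    have hjs' : ∀ j' ∈ js, 0 ≤ j' ∧ j' < (maps.headI.length : Int) := fun j' hj' => hjs j' (List.mem_cons_of_mem j hj')
    simp only [List.foldl_cons]
    by_cases hm : pvMget maps i j = 1
    · have hland : pvIsLand maps (maps.length : Int) (maps.headI.length : Int) i j = true := by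
        simp only [pvIsLand, decide_eq_true_eq]
        exact ⟨hi0, hi1, hj0, hj1, hm⟩
      by_cases hvz : pvVget stA.2 i j = 0
      · have hcont : PySem.Set.contains stB.2 (i, j) = false := by
          rcases hx : PySem.Set.contains stB.2 (i, j) with _ | _
          · rfl
          · exact absurd ((hrel i j hland).mpr hx) (by simp [hvz])
        rw [if_pos ⟨hm, hvz⟩, if_pos (by rw [hland, hcont]; rfl)]
        have hsim := pvSim maps [(i, j)] stB.2 (maps.length * maps.headI.length + 1) stA.2 hsh hrel hU
        have hdfsl : pvDfsL maps (maps.length * maps.headI.length + 1) [(i, j)] stA.2 =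
            ((pvDfs maps (maps.length : Int) (maps.headI.length : Int) (maps.length * maps.headI.length + 1) i j stA.2).1 + 0,
             (pvDfs maps (maps.length : Int) (maps.headI.length : Int) (maps.length * maps.headI.length + 1) i j stA.2).2) := by
          simp [pvDfsL]
        rw [hdfsl] at hsim
        dsimp only at hsim ⊢
        apply ih
        · exact hjs'
        · exact hsim.2.2.1
        · exact hsim.2.1
        · show pvU maps (pvDfs maps (maps.length : Int) (maps.headI.length : Int) (maps.length * maps.headI.length + 1) i j stA.2).2 < maps.length * maps.headI.length + 1
          have h1 : pvU maps (pvDfs maps (maps.length : Int) (maps.headI.length : Int) (maps.length * maps.headI.length + 1) i j stA.2).2 ≤ pvU maps stA.2 := hsim.2.2.2.2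
          have h2 := pvU_le_len maps stA.2
          omega
        · dsimp only
          rw [List.foldl_append]
          simp only [List.foldl_cons, List.foldl_nil]
          rw [← hmax]
          have := hsim.1
          omega
      · have hcont : PySem.Set.contains stB.2 (i, j) = true :=
          (hrel i j hland).mp hvz
        rw [if_neg (fun h => hvz h.2), if_neg (by rw [hland, hcont]; simp)]
        exact ih stA stB hjs' hsh hrel hU hmax
    · have hland : pvIsLand maps (maps.length : Int) (maps.headI.length : Int) i j = false := by
        simp only [pvIsLand, decide_eq_false_iff_not]
        intro h
        exact hm h.2.2.2.2
      rw [if_neg (fun h => hm h.1), if_neg (by simp [hland])]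
      exact ih stA stB hjs' hsh hrel hU hmax


theorem pvOuter (maps : List (List Int)) :
    ∀ (is : List Int) (stA : Int × List (List Int))
      (stB : List (List (Int × Int)) × PySem.Set (Int × Int)),
    (∀ i ∈ is, 0 ≤ i ∧ i < (maps.length : Int)) →
    pvVshape maps stA.2 → pvRel maps stA.2 stB.2 →
    pvU maps stA.2 < (maps.length * maps.headI.length + 1) →
    stA.1 = stB.1.foldl (fun best cells => max best (pvPerim maps (maps.length : Int) (maps.headI.length : Int) cells)) 0 →
    (is.foldl (fun st i => (PySem.List.pyRange 0 (maps.headI.length : Int) 1).foldl (fun st j =>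
          if pvMget maps i j = 1 ∧ pvVget st.2 i j = 0 then
            let p := pvDfs maps (maps.length : Int) (maps.headI.length : Int) (maps.length * maps.headI.length + 1) i j st.2
            (max st.1 p.1, p.2)
          else st) st) stA).1 =
        ((is.foldl (fun st i => (PySem.List.pyRange 0 (maps.headI.length : Int) 1).foldl (fun st j =>
          if pvIsLand maps (maps.length : Int) (maps.headI.length : Int) i j && !(PySem.Set.contains st.2 (i, j)) then
            let res := pvFlood maps (maps.length : Int) (maps.headI.length : Int) [(i, j)] st.2
            (st.1 ++ [res.1], res.2)
          else st) st) stB).1.foldl (fun best cells => max best (pvPerim maps (maps.length : Int) (maps.headI.length : Int) cells)) 0) := by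
  intro is
  induction is with
  | nil =>
    intro stA stB his hsh hrel hU hmax
    exact hmax
  | cons i is ih =>
    intro stA stB his hsh hrel hU hmax
    obtain ⟨hi0, hi1⟩ := his i (List.mem_cons_self)
    have his' : ∀ i' ∈ is, 0 ≤ i' ∧ i' < (maps.length : Int) :=
      fun i' hi' => his i' (List.mem_cons_of_mem i hi')
    simp only [List.foldl_cons]
    have hin := pvInner maps i hi0 hi1 (PySem.List.pyRange 0 (maps.headI.length : Int) 1) stA stB
      (fun j hj => by
        have := (PySem.List.mem_pyRange_one).mp hj
        exact ⟨this.1, this.2⟩)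
      hsh hrel hU hmax
    exact ih _ _ his' hin.2.1 hin.2.2.1 hin.2.2.2 hin.1


-- ===== VERDICT (by name: the statement is the Claim_ definition above) =====
theorem solution_spec : Claim_equal_solution := by
  unfold Claim_equal_solution
  intro maps hdom hpre
  unfold Spec_solution solution solution_alt
  by_cases hne : maps = []
  · rw [if_pos hne, if_pos hne]
  · rw [if_neg hne, if_neg hne]
    dsimp only
    have hsh0 : pvVshape maps (List.replicate maps.length (List.replicate maps.headI.length (0 : Int))) := by
      refine ⟨by simp, ?_⟩
      intro row hrow
      rw [List.eq_of_mem_replicate hrow]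
      simp
    have hrel0 : pvRel maps (List.replicate maps.length (List.replicate maps.headI.length (0 : Int)))
        (PySem.Set.empty : PySem.Set (Int × Int)) := by
      intro r c hl
      rw [pvVget_replicate]
      constructor
      · intro h; exact absurd rfl h
      · intro h; cases h
    have hU0 : pvU maps (List.replicate maps.length (List.replicate maps.headI.length (0 : Int)))
        < maps.length * maps.headI.length + 1 := by
      have := pvU_le_len maps (List.replicate maps.length (List.replicate maps.headI.length (0 : Int)))
      omega
    exact pvOuter maps (PySem.List.pyRange 0 (maps.length : Int) 1)
      ((0 : Int), List.replicate maps.length (List.replicate maps.headI.length (0 : Int)))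
      (([] : List (List (Int × Int))), (PySem.Set.empty : PySem.Set (Int × Int)))
      (fun i hi => by
        have := (PySem.List.mem_pyRange_one).mp hi
        exact ⟨this.1, this.2⟩)
      hsh0 hrel0 hU0 rfl
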